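-- pv_equiv track=rewrite | github.com/joydipdutta001/pythonProblems | codeforces/P1-youngPhysicist.py | youngPhysicist
-- ===== SOURCE A (Python) =====
-- def youngPhysicist(arr):
--     c,d,e= 0,0,0
--     for i in range(len(arr)):
--         c += arr[i][0]
--         d += arr[i][1]
--         e += arr[i][2]
--
--     if c==0 and d == 0 and e == 0:
--         return "YES"
--     else:
--         return "NO"
-- ===== SOURCE B (Python) =====
-- def youngPhysicist(arr):
--     # Divide and conquer: recursively sum the vectors in arr[lo:hi] by halving
--     # the index range, then test the combined sum against the zero vector.
--     def vsum(lo, hi):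
--         if hi - lo == 0:
--             return (0, 0, 0)
--         if hi - lo == 1:
--             r = arr[lo]
--             return (r[0], r[1], r[2])
--         mid = (lo + hi) // 2
--         a = vsum(lo, mid)
--         b = vsum(mid, hi)
--         return (a[0] + b[0], a[1] + b[1], a[2] + b[2])
--     return "YES" if vsum(0, len(arr)) == (0, 0, 0) else "NO"
-- ===== Notes on version B (the rewrite author's own statement) =====
-- stated objective: alternative
-- what changed: B computes the total force by recursive divide-and-conquer over index ranges (halve, sum each half, combine) instead of A's single index loop threading three accumulators, then compares against the zero vector.
import Mathlib
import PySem

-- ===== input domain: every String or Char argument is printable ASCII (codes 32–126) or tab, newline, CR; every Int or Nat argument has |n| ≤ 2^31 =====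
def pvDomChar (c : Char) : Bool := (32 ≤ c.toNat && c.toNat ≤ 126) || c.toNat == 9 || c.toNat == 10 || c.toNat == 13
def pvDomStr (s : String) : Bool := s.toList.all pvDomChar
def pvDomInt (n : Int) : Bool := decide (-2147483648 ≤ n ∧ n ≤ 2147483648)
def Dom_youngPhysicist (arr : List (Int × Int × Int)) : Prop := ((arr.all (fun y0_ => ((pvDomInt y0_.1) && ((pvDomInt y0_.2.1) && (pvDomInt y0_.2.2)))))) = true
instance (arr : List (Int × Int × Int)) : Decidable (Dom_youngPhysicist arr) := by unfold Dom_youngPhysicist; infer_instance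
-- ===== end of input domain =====

-- B sums the vectors by recursive divide-and-conquer over index ranges instead of A's single accumulator loop; objective: alternative decomposition (same O(n) cost).

-- ===== PORT A =====
-- A: index loop threading three accumulators c,d,e over range(len(arr)).
def youngPhysicist (arr : List (Int × Int × Int)) : String :=
  let s := (PySem.List.pyRange 0 arr.length 1).foldl
    (fun (cde : Int × Int × Int) i =>
      let t := (PySem.List.pyGet? arr i).getD (0, 0, 0)  -- i ∈ range(len arr), always in range
      (cde.1 + t.1, cde.2.1 + t.2.1, cde.2.2 + t.2.2)) (0, 0, 0)
  if s.1 = 0 ∧ s.2.1 = 0 ∧ s.2.2 = 0 then "YES" else "NO"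

-- ===== PORT B =====
-- B's helper vsum(lo, hi): divide-and-conquer sum of arr[lo:hi].
def vsumB (arr : List (Int × Int × Int)) (lo hi : Nat) : Int × Int × Int :=
  if hi - lo = 0 then (0, 0, 0)
  else if hi - lo = 1 then
    let r := (PySem.List.pyGet? arr (Int.ofNat lo)).getD (0, 0, 0)  -- lo in range at every call site
    (r.1, r.2.1, r.2.2)
  else
    let mid := (lo + hi) / 2  -- lo+hi ≥ 0 so Python's // agrees with Nat division
    let a := vsumB arr lo mid
    let b := vsumB arr mid hi
    (a.1 + b.1, a.2.1 + b.2.1, a.2.2 + b.2.2)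
termination_by hi - lo
decreasing_by all_goals omega

def youngPhysicist_alt (arr : List (Int × Int × Int)) : String :=
  if vsumB arr 0 arr.length = ((0 : Int), (0 : Int), (0 : Int)) then "YES" else "NO"

-- ===== PRECONDITION & SPEC =====
def Spec_youngPhysicist (arr : List (Int × Int × Int)) (out : String) : Prop := out = youngPhysicist_alt arr
instance (arr : List (Int × Int × Int)) (out : String) : Decidable (Spec_youngPhysicist arr out) := by unfold Spec_youngPhysicist; infer_instance

-- ===== CLAIM (what is proved, stated in full; the proofs are below) =====
def Claim_equal_youngPhysicist : Prop := ∀ (arr : List (Int × Int × Int)), Dom_youngPhysicist arr → Spec_youngPhysicist arr (youngPhysicist arr)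

-- ===== LEMMAS AND PROOFS =====

-- ===== VERDICT (by name: the statement is the Claim_ definition above) =====
-- A's fold equals the triple of component sums.
lemma foldA_eq (arr : List (Int × Int × Int)) (c d e : Int) :
    (List.range arr.length).foldl
      (fun (cde : Int × Int × Int) i =>
        let t := arr.getD i (0, 0, 0)
        (cde.1 + t.1, cde.2.1 + t.2.1, cde.2.2 + t.2.2)) (c, d, e)
    = (c + (arr.map (·.1)).sum, d + (arr.map (·.2.1)).sum, e + (arr.map (·.2.2)).sum) := by
  induction arr generalizing c d e with
  | nil => simp
  | cons h t ih =>
      simp only [List.length_cons, List.range_succ_eq_map, List.foldl_cons, List.foldl_map,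
        List.getD_cons_zero, List.map_cons, List.sum_cons]
      have := ih (c + h.1) (d + h.2.1) (e + h.2.2)
      simp only [List.getD_cons_succ] at this ⊢
      rw [show (List.range t.length).foldl
        (fun (cde : Int × Int × Int) i => ((cde.1 + (t.getD i (0,0,0)).1,
          cde.2.1 + (t.getD i (0,0,0)).2.1, cde.2.2 + (t.getD i (0,0,0)).2.2)))
        (c + h.1, d + h.2.1, e + h.2.2) = _ from this]
      ring_nf

-- B's divide-and-conquer helper computes the component sums over the index range [lo, hi).
lemma vsumB_spec (arr : List (Int × Int × Int)) :
    ∀ (n lo hi : Nat), hi - lo = n → hi ≤ arr.length →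
    vsumB arr lo hi =
      (((List.range' lo n).map (fun i => (arr.getD i (0,0,0)).1)).sum,
       ((List.range' lo n).map (fun i => (arr.getD i (0,0,0)).2.1)).sum,
       ((List.range' lo n).map (fun i => (arr.getD i (0,0,0)).2.2)).sum) := by
  intro n
  induction n using Nat.strong_induction_on with
  | _ n ih =>
    intro lo hi hn hhi
    match n, hn with
    | 0, hn =>
        rw [vsumB]; simp [hn]
    | 1, hn =>
        rw [vsumB]
        have hlo : lo < arr.length := by omega
        simp [hn, List.range'_succ, PySem.List.pyGet?_natCast,
          List.getElem?_eq_getElem hlo, List.getD, Int.ofNat_eq_natCast]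
    | (m+2), hn =>
        rw [vsumB]
        have h0 : ¬ (hi - lo = 0) := by omega
        have h1 : ¬ (hi - lo = 1) := by omega
        simp only [h0, h1, if_false]
        set mid := (lo + hi) / 2 with hmid
        have hml : lo < mid := by omega
        have hmh : mid < hi := by omega
        have e1 := ih (mid - lo) (by omega) lo mid rfl (by omega)
        have e2 := ih (hi - mid) (by omega) mid hi rfl hhi
        rw [e1, e2]
        have hsplit : List.range' lo (m+2) =
            List.range' lo (mid - lo) ++ List.range' mid (hi - mid) := by
          have : List.range' lo (mid - lo) ++ List.range' (lo + (mid - lo)) (hi - mid)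
              = List.range' lo ((mid - lo) + (hi - mid)) := by
            simp
          rw [show lo + (mid - lo) = mid by omega, show (mid - lo) + (hi - mid) = m + 2 by omega] at this
          exact this.symm
        simp [hsplit]

-- Mapping getD over range(len arr) recovers arr itself.
lemma map_getD_range (arr : List (Int × Int × Int)) :
    (List.range arr.length).map (fun i => arr.getD i (0,0,0)) = arr := by
  apply List.ext_getElem
  · simp
  · intro i h1 h2
    simp [List.getD_eq_getElem?_getD, List.getElem?_eq_getElem h2]

theorem youngPhysicist_spec : Claim_equal_youngPhysicist := by
  intro arr _
  show youngPhysicist arr = youngPhysicist_alt arr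
  unfold youngPhysicist youngPhysicist_alt
  have hr : PySem.List.pyRange 0 arr.length 1 = (List.range arr.length).map (Int.ofNat) := by
    simp [PySem.List.pyRange_zero_natCast]
  have hget : ∀ i ∈ List.range arr.length,
      ((PySem.List.pyGet? arr (Int.ofNat i)).getD (0,0,0)) = arr.getD i (0,0,0) := by
    intro i hi
    rw [List.mem_range] at hi
    simp [List.getD, List.getElem?_eq_getElem hi]
  simp only [hr, List.foldl_map]
  have key := PySem.List.foldl_congr_mem (l := List.range arr.length)
    (f := fun (x : Int × Int × Int) (y : Nat) =>
      (x.1 + ((PySem.List.pyGet? arr (Int.ofNat y)).getD (0,0,0)).1,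
       x.2.1 + ((PySem.List.pyGet? arr (Int.ofNat y)).getD (0,0,0)).2.1,
       x.2.2 + ((PySem.List.pyGet? arr (Int.ofNat y)).getD (0,0,0)).2.2))
    (g := fun (x : Int × Int × Int) (y : Nat) =>
      (x.1 + (arr.getD y (0,0,0)).1, x.2.1 + (arr.getD y (0,0,0)).2.1,
       x.2.2 + (arr.getD y (0,0,0)).2.2))
    (init := ((0 : Int), (0 : Int), (0 : Int)))
    (by intro acc x hx; simp only [hget x hx])
  rw [key, foldA_eq]
  have hb := vsumB_spec arr arr.length 0 arr.length (by omega) (le_refl _)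
  rw [hb]
  have hrange : List.range' 0 arr.length = List.range arr.length := List.range_eq_range'.symm
  have hm := map_getD_range arr
  have c1 : ((List.range' 0 arr.length).map (fun i => (arr.getD i (0,0,0)).1)).sum
      = (arr.map (·.1)).sum := by
    rw [hrange, show (fun i => (arr.getD i ((0:Int),(0:Int),(0:Int))).1)
      = (·.1) ∘ (fun i => arr.getD i (0,0,0)) from rfl, ← List.map_map, hm]
  have c2 : ((List.range' 0 arr.length).map (fun i => (arr.getD i (0,0,0)).2.1)).sum
      = (arr.map (·.2.1)).sum := by
    rw [hrange, show (fun i => (arr.getD i ((0:Int),(0:Int),(0:Int))).2.1)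
      = (·.2.1) ∘ (fun i => arr.getD i (0,0,0)) from rfl, ← List.map_map, hm]
  have c3 : ((List.range' 0 arr.length).map (fun i => (arr.getD i (0,0,0)).2.2)).sum
      = (arr.map (·.2.2)).sum := by
    rw [hrange, show (fun i => (arr.getD i ((0:Int),(0:Int),(0:Int))).2.2)
      = (·.2.2) ∘ (fun i => arr.getD i (0,0,0)) from rfl, ← List.map_map, hm]
  rw [c1, c2, c3]
  simp [Prod.ext_iff]
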